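-- pv_equiv track=rewrite | github.com/Yeongjae-Kong/ssafycodingtest | 백준/Silver/1072. 게임/게임.py | solution
-- ===== SOURCE A (Python) =====
-- def solution(X, Y):
--     Z = (Y * 100) // X
--     if Z >= 99:
--         return -1
--
--     left, right = 1, 1000000000
--     answer = -1
--
--     while left <= right:
--         mid = (left + right) // 2
--         newZ = ((Y + mid) * 100) // (X + mid)
--
--         if newZ > Z:
--             answer = mid
--             right = mid - 1
--         else:
--             left = mid + 1
--
--     return answer
-- ===== SOURCE B (Python) =====
-- def solution(X, Y):
--     Z = (Y * 100) // X
--     if Z >= 99: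
--         return -1
--     num = (Z + 1) * X - 100 * Y
--     den = 99 - Z
--     mid = -(-num // den)
--     return mid if mid <= 1000000000 else -1
-- ===== Notes on version B (the rewrite author's own statement) =====
-- stated objective: simpler
-- what changed: Replaces the 30-iteration binary search over [1,10^9] with a closed-form ceiling-division formula for the least mid that raises the floored percentage, keeping the Z>=99 guard and the 10^9 cap.
-- outside the precondition, e.g. on solution(-2147483648, 3): A returns -1, B returns -3; on solution(-1, 3): A raises ZeroDivisionError, B returns 0
import Mathlib
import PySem

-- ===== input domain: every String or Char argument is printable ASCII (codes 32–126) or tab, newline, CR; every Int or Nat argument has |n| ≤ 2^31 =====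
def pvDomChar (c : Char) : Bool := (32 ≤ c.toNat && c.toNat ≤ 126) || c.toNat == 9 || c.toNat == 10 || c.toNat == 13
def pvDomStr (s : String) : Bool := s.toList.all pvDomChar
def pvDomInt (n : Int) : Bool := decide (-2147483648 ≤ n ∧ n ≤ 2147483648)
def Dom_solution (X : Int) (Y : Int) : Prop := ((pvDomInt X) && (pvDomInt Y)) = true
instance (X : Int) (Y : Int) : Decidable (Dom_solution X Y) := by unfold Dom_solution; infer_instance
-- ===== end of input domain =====

-- B replaces A's binary search over [1, 10^9] by a closed-form ceiling-division formula (simpler: no loop).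

-- ===== PORT A =====
-- the while-loop of A, step for step; state (left, right, answer)
def solLoop (X Y Z : Int) (left right answer : Int) : Int :=
  if _h : left ≤ right then
    let mid := PySem.Int.floordiv (left + right) 2
    let newZ := PySem.Int.floordiv ((Y + mid) * 100) (X + mid)
    if newZ > Z then solLoop X Y Z left (mid - 1) mid
    else solLoop X Y Z (mid + 1) right answer
  else answer
termination_by (right + 1 - left).toNat
decreasing_by
  · have := PySem.Int.floordiv_two_mid_bounds (by omega : left ≤ right)
    omega
  · have := PySem.Int.floordiv_two_mid_bounds (by omega : left ≤ right)
    omega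

def solution (X : Int) (Y : Int) : Int :=
  let Z := PySem.Int.floordiv (Y * 100) X
  if Z ≥ 99 then -1
  else solLoop X Y Z 1 1000000000 (-1)

-- ===== PORT B =====
def solution_alt (X : Int) (Y : Int) : Int :=
  let Z := PySem.Int.floordiv (Y * 100) X
  if Z ≥ 99 then -1
  else
    let num := (Z + 1) * X - 100 * Y
    let den := 99 - Z
    let mid := -(PySem.Int.floordiv (-num) den)
    if mid ≤ 1000000000 then mid else -1

-- ===== PRECONDITION & SPEC =====
-- Pre_ restricts to the problem's natural domain X ≥ 1 (X is the number of games played): at X = 0 A raises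
-- ZeroDivisionError, and for X < 0 A either raises (the search divides by X + mid = 0) or its value is an
-- artefact of dividing by non-positive game counts.
def Pre_solution (X : Int) (Y : Int) : Prop := 1 ≤ X
instance (X : Int) (Y : Int) : Decidable (Pre_solution X Y) := by unfold Pre_solution; infer_instance
def pvWitness_solution : Int × Int := (10, 8)
def Spec_solution (X : Int) (Y : Int) (out : Int) : Prop := out = solution_alt X Y
instance (X : Int) (Y : Int) (out : Int) : Decidable (Spec_solution X Y out) := by unfold Spec_solution; infer_instance

-- ===== CLAIM (what is proved, stated in full; the proofs are below) =====
def Claim_equal_solution : Prop := ∀ (X : Int) (Y : Int), Dom_solution X Y → Pre_solution X Y → Spec_solution X Y (solution X Y)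

-- ===== LEMMAS AND PROOFS =====

-- P mid ⇔ mid * den ≥ num : the search predicate is a linear inequality (X + mid > 0, den > 0)
lemma newZ_gt_iff (X Y Z mid : Int) (hX : 1 ≤ X) (hm : 1 ≤ mid) (hZ : Z ≤ 98) :
    (PySem.Int.floordiv ((Y + mid) * 100) (X + mid) > Z) ↔ (Z + 1) * X - 100 * Y ≤ mid * (99 - Z) := by
  have hpos : (0:Int) < X + mid := by omega
  rw [show (PySem.Int.floordiv ((Y + mid) * 100) (X + mid) > Z) ↔
        (Z + 1 ≤ PySem.Int.floordiv ((Y + mid) * 100) (X + mid)) from by omega,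
      PySem.Int.le_floordiv_iff_mul_le hpos]
  constructor <;> intro h <;> nlinarith

-- the loop computes: L if L ≤ 10^9 else -1, where L = least m with m*den ≥ num (phrased arithmetically)
lemma solLoop_eq (X Y Z : Int) (hX : 1 ≤ X) (hZ : Z ≤ 98) (L : Int)
    (hL : ∀ m : Int, (Z + 1) * X - 100 * Y ≤ m * (99 - Z) ↔ L ≤ m) :
    ∀ (n : Nat) (left right answer : Int), (right + 1 - left).toNat ≤ n →
      1 ≤ left → right ≤ 1000000000 → left ≤ L →
      (answer = -1 → right = 1000000000) →
      (answer = -1 ∨ (answer = right + 1 ∧ L ≤ answer ∧ answer ≤ 1000000000)) →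
      solLoop X Y Z left right answer = if L ≤ 1000000000 then L else -1 := by
  intro n
  induction n with
  | zero =>
    intro left right answer hn h1 h2 h3 h4 h5
    have hlr : ¬ left ≤ right := by omega
    rw [solLoop]
    simp only [dif_neg hlr]
    rcases h5 with h5 | ⟨h5, h6, h8⟩
    · have h7 := h4 h5
      rw [if_neg (by omega)]
      exact h5
    · rw [if_pos (by omega)]
      omega
  | succ n ih =>
    intro left right answer hn h1 h2 h3 h4 h5
    rw [solLoop]
    by_cases hlr : left ≤ right
    · simp only [dif_pos hlr]
      have hmid := PySem.Int.floordiv_two_mid_bounds hlr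
      set mid := PySem.Int.floordiv (left + right) 2 with hmd
      by_cases hgt : PySem.Int.floordiv ((Y + mid) * 100) (X + mid) > Z
      · rw [if_pos hgt]
        have hP : L ≤ mid := (hL mid).mp ((newZ_gt_iff X Y Z mid hX (by omega) hZ).mp hgt)
        exact ih left (mid - 1) mid (by omega) h1 (by omega) h3 (by omega)
          (Or.inr ⟨by omega, hP, by omega⟩)
      · rw [if_neg hgt]
        have hP : ¬ L ≤ mid := fun hc =>
          hgt ((newZ_gt_iff X Y Z mid hX (by omega) hZ).mpr ((hL mid).mpr hc))
        exact ih (mid + 1) right answer (by omega) (by omega) h2 (by omega) h4 h5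
    · simp only [dif_neg hlr]
      rcases h5 with h5 | ⟨h5, h6, h8⟩
      · have h7 := h4 h5
        rw [if_neg (by omega)]
        exact h5
      · rw [if_pos (by omega)]
        omega

theorem solution_spec : Claim_equal_solution := by
  unfold Claim_equal_solution Spec_solution Pre_solution
  intro X Y _ hX
  unfold solution solution_alt
  set Z := PySem.Int.floordiv (Y * 100) X with hZdef
  by_cases hZ : Z ≥ 99
  · simp [hZ]
  · simp only [if_neg hZ]
    have hden : (0:Int) < 99 - Z := by omega
    set num := (Z + 1) * X - 100 * Y with hnum
    set L := -(PySem.Int.floordiv (-num) (99 - Z)) with hLdef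
    -- ceiling characterisation: num ≤ m * den ↔ L ≤ m
    have hch : (L - 1) * (99 - Z) < num ∧ num ≤ L * (99 - Z) :=
      (PySem.Int.neg_floordiv_neg_eq_iff_of_pos hden).mp rfl
    have hL : ∀ m : Int, num ≤ m * (99 - Z) ↔ L ≤ m := by
      intro m
      constructor <;> intro h
      · by_contra hc
        have hm1 : m ≤ L - 1 := by omega
        have : m * (99 - Z) ≤ (L - 1) * (99 - Z) := by nlinarith
        omega
      · have : L * (99 - Z) ≤ m * (99 - Z) := by nlinarith
        omega
    -- 1 ≤ L : num ≥ 1 since Z = floor(100Y/X)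
    have hZch : Z * X ≤ Y * 100 ∧ Y * 100 < (Z + 1) * X :=
      (PySem.Int.floordiv_eq_iff_of_pos (by omega : (0:Int) < X)).mp hZdef.symm
    have h1L : 1 ≤ L := by
      by_contra hc
      have := (hL 0).mpr (by omega)
      simp at this
      omega
    rw [solLoop_eq X Y Z hX (by omega) L hL 1000000000 1 1000000000 (-1) (by omega) (by omega)
        (by omega) h1L (fun _ => rfl) (Or.inl rfl)]
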